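-- pv_equiv track=rewrite | github.com/noyamoyal/BallSortPuzzle | heuristic_search.py | misplaced_balls
-- ===== SOURCE A (Python) =====
-- def misplaced_balls(board):
--     """
--     Heuristic function to estimate the cost of reaching the goal state.
--
--     :param board: List of lists, where each inner list represents a tube with balls represented as color strings.
--     :return: Estimated cost to reach the goal state (lower is better).
--     """
--     misplaced = 0
--     for tube in board:
--         if not tube:  # Skip empty tubes
--             continue
--
--         current_color = tube[0]
--         for ball in tube:
--             # Count balls that are misplaced
--             if ball != current_color:
--                 misplaced += 1
--
--             # Update current color to keep tracking only the top color correctly placed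
--             current_color = ball
--     return misplaced
-- ===== SOURCE B (Python) =====
-- def _runs(tube):
--     """Number of maximal runs of equal adjacent colors (0 for empty)."""
--     if not tube:
--         return 0
--     head = tube[0]
--     i = 0
--     while i < len(tube) and tube[i] == head:
--         i += 1
--     return 1 + _runs(tube[i:])
--
-- def misplaced_balls(board):
--     return sum(_runs(tube) - 1 for tube in board if tube)
-- ===== Notes on version B (the rewrite author's own statement) =====
-- stated objective: alternative
-- what changed: B collapses each tube into maximal runs of equal color (skipping each whole run at once, recursively) and sums runs-1 per non-empty tube, instead of A's ball-by-ball comparison with the previous ball.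
import Mathlib
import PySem

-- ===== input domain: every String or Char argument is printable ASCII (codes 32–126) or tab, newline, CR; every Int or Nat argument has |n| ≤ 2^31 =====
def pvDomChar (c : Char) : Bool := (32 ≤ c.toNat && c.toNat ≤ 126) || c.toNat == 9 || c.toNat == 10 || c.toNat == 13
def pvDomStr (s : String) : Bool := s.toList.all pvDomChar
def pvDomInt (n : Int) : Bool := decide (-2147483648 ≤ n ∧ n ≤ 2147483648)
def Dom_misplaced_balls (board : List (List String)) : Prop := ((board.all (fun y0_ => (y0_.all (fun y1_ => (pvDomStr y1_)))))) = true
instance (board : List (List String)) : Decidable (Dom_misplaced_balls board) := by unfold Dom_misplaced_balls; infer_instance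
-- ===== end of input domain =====

-- B counts misplaced balls by collapsing each tube into maximal equal-color runs
-- (skipping a whole run at a time, recursively) and summing runs-1 per non-empty tube;
-- alternative decomposition, same cost. Equivalence proved on all inputs.
-- ===== PORT A =====
def misplaced_balls (board : List (List String)) : Int :=
  board.foldl (fun misplaced tube =>
    match tube with
    | [] => misplaced  -- `if not tube: continue`
    | c :: _ =>
      (tube.foldl (fun (st : Int × String) ball =>
        (if ball ≠ st.2 then st.1 + 1 else st.1, ball)) (misplaced, c)).1) 0

-- ===== PORT B =====
-- number of maximal runs of equal adjacent colors (0 for empty); the Python while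
-- loop that skips the leading run is `dropWhile (· == head)` on the tail.
def pvRuns : List String → Int
  | [] => 0
  | h :: t => 1 + pvRuns (t.dropWhile (· == h))
termination_by l => l.length
decreasing_by
  have := List.length_dropWhile_le (fun x => x == h) t
  simp only [List.length_cons]; omega

def misplaced_balls_alt (board : List (List String)) : Int :=
  board.foldl (fun total tube => if tube ≠ [] then total + (pvRuns tube - 1) else total) 0

-- ===== PRECONDITION & SPEC =====
def Spec_misplaced_balls (board : List (List String)) (out : Int) : Prop := out = misplaced_balls_alt board
instance (board : List (List String)) (out : Int) : Decidable (Spec_misplaced_balls board out) := by unfold Spec_misplaced_balls; infer_instance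

-- ===== CLAIM (what is proved, stated in full; the proofs are below) =====
def Claim_equal_misplaced_balls : Prop := ∀ (board : List (List String)), Dom_misplaced_balls board → Spec_misplaced_balls board (misplaced_balls board)

-- ===== LEMMAS AND PROOFS =====

-- count of balls differing from the running previous color
def pvAdj : String → List String → Int
  | _, [] => 0
  | p, x :: xs => (if x ≠ p then 1 else 0) + pvAdj x xs

theorem pvFold_adj (xs : List String) : ∀ (m : Int) (p : String),
    (xs.foldl (fun (st : Int × String) ball =>
      (if ball ≠ st.2 then st.1 + 1 else st.1, ball)) (m, p)).1 = m + pvAdj p xs := by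
  induction xs with
  | nil => intro m p; simp [pvAdj]
  | cons x xs ih =>
    intro m p
    simp only [List.foldl_cons, pvAdj, ih]
    by_cases h : x = p
    · simp [h]
    · simp [h]; ring

theorem pvRuns_adj (xs : List String) : ∀ (p : String),
    pvRuns (p :: xs) = 1 + pvAdj p xs := by
  induction xs with
  | nil => intro p; simp [pvRuns, pvAdj]
  | cons x t ih =>
    intro p
    by_cases h : x = p
    · subst h
      have : pvRuns (x :: x :: t) = pvRuns (x :: t) := by
        simp [pvRuns, List.dropWhile]
      rw [this, ih]
      simp [pvAdj]
    · have hx : (x == p) = false := by simp [h]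
      have : pvRuns (p :: x :: t) = 1 + pvRuns (x :: t) := by
        simp [pvRuns, List.dropWhile, hx]
      rw [this, ih]
      simp [pvAdj, h]

theorem pvOuter (board : List (List String)) : ∀ (m : Int),
    board.foldl (fun misplaced tube =>
      match tube with
      | [] => misplaced
      | c :: _ =>
        (tube.foldl (fun (st : Int × String) ball =>
          (if ball ≠ st.2 then st.1 + 1 else st.1, ball)) (misplaced, c)).1) m
    = board.foldl (fun total tube => if tube ≠ [] then total + (pvRuns tube - 1) else total) m := by
  induction board with
  | nil => intro m; rfl
  | cons tube rest ih =>
    intro m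
    simp only [List.foldl_cons]
    rw [← ih]
    congr 1
    match tube with
    | [] => rfl
    | c :: cs =>
      simp only [pvFold_adj, pvRuns_adj]
      simp [pvAdj]

-- ===== VERDICT (by name: the statement is the Claim_ definition above) =====
theorem misplaced_balls_spec : Claim_equal_misplaced_balls := by
  intro board _
  unfold Spec_misplaced_balls misplaced_balls misplaced_balls_alt
  exact pvOuter board 0
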